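-- pv_equiv track=rewrite | github.com/Sodiumsss/maimaiBot | src/libraries/maimai_best_40.py | _getCharWidth
-- ===== SOURCE A (Python) =====
-- def _getCharWidth(o) -> int:
--     widths = [
--         (126, 1), (159, 0), (687, 1), (710, 0), (711, 1), (727, 0), (733, 1), (879, 0), (1154, 1), (1161, 0),
--         (4347, 1), (4447, 2), (7467, 1), (7521, 0), (8369, 1), (8426, 0), (9000, 1), (9002, 2), (11021, 1),
--         (12350, 2), (12351, 1), (12438, 2), (12442, 0), (19893, 2), (19967, 1), (55203, 2), (63743, 1),
--         (64106, 2), (65039, 1), (65059, 0), (65131, 2), (65279, 1), (65376, 2), (65500, 1), (65510, 2),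
--         (120831, 1), (262141, 2), (1114109, 1),
--     ]
--     if o == 0xe or o == 0xf:
--         return 0
--     for num, wid in widths:
--         if o <= num:
--             return wid
--     return 1
-- ===== SOURCE B (Python) =====
-- _BOUNDS = [126, 159, 687, 710, 711, 727, 733, 879, 1154, 1161,
--            4347, 4447, 7467, 7521, 8369, 8426, 9000, 9002, 11021,
--            12350, 12351, 12438, 12442, 19893, 19967, 55203, 63743,
--            64106, 65039, 65059, 65131, 65279, 65376, 65500, 65510,
--            120831, 262141, 1114109]
-- _WIDTHS = [1, 0, 1, 0, 1, 0, 1, 0, 1, 0,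
--            1, 2, 1, 0, 1, 0, 1, 2, 1,
--            2, 1, 2, 0, 2, 1, 2, 1,
--            2, 1, 0, 2, 1, 2, 1, 2,
--            1, 2, 1]
--
-- def _getCharWidth(o) -> int:
--     if o == 0xe or o == 0xf:
--         return 0
--     # binary search: first index with _BOUNDS[i] >= o (bisect_left)
--     lo, hi = 0, len(_BOUNDS)
--     while lo < hi:
--         mid = (lo + hi) // 2
--         if _BOUNDS[mid] < o:
--             lo = mid + 1
--         else:
--             hi = mid
--     return _WIDTHS[lo] if lo < len(_WIDTHS) else 1
-- ===== Notes on version B (the rewrite author's own statement) =====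
-- stated objective: alternative
-- what changed: Replaces the linear scan of the (bound,width) table with a hand-written bisect_left binary search over a precomputed sorted bounds list and a parallel widths list, with the same out-of-range fallback of 1.
import Mathlib
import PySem

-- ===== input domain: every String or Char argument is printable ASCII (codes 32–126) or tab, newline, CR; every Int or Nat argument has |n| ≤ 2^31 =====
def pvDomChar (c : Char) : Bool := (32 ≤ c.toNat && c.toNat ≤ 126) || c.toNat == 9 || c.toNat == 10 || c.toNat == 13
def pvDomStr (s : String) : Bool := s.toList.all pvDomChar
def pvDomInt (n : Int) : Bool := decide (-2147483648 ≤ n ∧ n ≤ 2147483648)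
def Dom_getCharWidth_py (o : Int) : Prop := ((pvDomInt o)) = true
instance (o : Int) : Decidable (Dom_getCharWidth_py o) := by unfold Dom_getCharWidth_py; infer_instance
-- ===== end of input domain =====

-- B replaces A's linear table scan with a hand-written bisect_left binary search over the same sorted bounds (alternative algorithm, same exact results).
-- ===== PORT A =====
-- linear scan of the (bound, width) table, first row with o <= bound wins
def pvWidthsA : List (Int × Int) :=
  [(126, 1), (159, 0), (687, 1), (710, 0), (711, 1), (727, 0), (733, 1), (879, 0), (1154, 1), (1161, 0),
   (4347, 1), (4447, 2), (7467, 1), (7521, 0), (8369, 1), (8426, 0), (9000, 1), (9002, 2), (11021, 1),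
   (12350, 2), (12351, 1), (12438, 2), (12442, 0), (19893, 2), (19967, 1), (55203, 2), (63743, 1),
   (64106, 2), (65039, 1), (65059, 0), (65131, 2), (65279, 1), (65376, 2), (65500, 1), (65510, 2),
   (120831, 1), (262141, 2), (1114109, 1)]

def pvScanA (o : Int) : List (Int × Int) → Int
  | [] => 1
  | (num, wid) :: rest => if o ≤ num then wid else pvScanA o rest

def getCharWidth_py (o : Int) : Int :=
  if o = 0xe ∨ o = 0xf then 0 else pvScanA o pvWidthsA

-- ===== PORT B =====
def pvBounds : List Int :=
  [126, 159, 687, 710, 711, 727, 733, 879, 1154, 1161,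
   4347, 4447, 7467, 7521, 8369, 8426, 9000, 9002, 11021,
   12350, 12351, 12438, 12442, 19893, 19967, 55203, 63743,
   64106, 65039, 65059, 65131, 65279, 65376, 65500, 65510,
   120831, 262141, 1114109]

def pvWidthsB : List Int :=
  [1, 0, 1, 0, 1, 0, 1, 0, 1, 0,
   1, 2, 1, 0, 1, 0, 1, 2, 1,
   2, 1, 2, 0, 2, 1, 2, 1,
   2, 1, 0, 2, 1, 2, 1, 2,
   1, 2, 1]

-- the while-loop of Source B, fuel-bounded (fuel ≥ hi - lo suffices, exact on every call here)
def pvBisectGo (o : Int) : Nat → Nat → Nat → Nat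
  | 0, lo, _ => lo
  | fuel + 1, lo, hi =>
    if lo < hi then
      let mid := (lo + hi) / 2
      if pvBounds.getD mid 0 < o then pvBisectGo o fuel (mid + 1) hi
      else pvBisectGo o fuel lo mid
    else lo

def getCharWidth_py_alt (o : Int) : Int :=
  if o = 0xe ∨ o = 0xf then 0
  else
    let lo := pvBisectGo o pvBounds.length 0 pvBounds.length
    if lo < pvWidthsB.length then pvWidthsB.getD lo 1 else 1

-- ===== PRECONDITION & SPEC =====
def Spec_getCharWidth_py (o : Int) (out : Int) : Prop := out = getCharWidth_py_alt o
instance (o : Int) (out : Int) : Decidable (Spec_getCharWidth_py o out) := by unfold Spec_getCharWidth_py; infer_instance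

-- ===== CLAIM (what is proved, stated in full; the proofs are below) =====
def Claim_equal_getCharWidth_py : Prop := ∀ (o : Int), Dom_getCharWidth_py o → Spec_getCharWidth_py o (getCharWidth_py o)

-- ===== LEMMAS AND PROOFS =====

-- ===== VERDICT (by name: the statement is the Claim_ definition above) =====
-- P i ≡ pvBounds[i] < o; the sorted table makes the truth set of P a prefix
def pvLt (o : Int) (i : Nat) : Prop := pvBounds.getD i 0 < o

lemma pvBounds_pairwise : pvBounds.Pairwise (· ≤ ·) := by decide

lemma pvBounds_mono {i j : Nat} (hij : i ≤ j) (hj : j < 38) :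
    pvBounds.getD i 0 ≤ pvBounds.getD j 0 := by
  have hlen : pvBounds.length = 38 := by decide
  rcases Nat.lt_or_ge i j with h | h
  · have := (List.pairwise_iff_getElem.mp pvBounds_pairwise) i j (by omega) (by omega) h
    rw [List.getD_eq_getElem _ _ (by omega), List.getD_eq_getElem _ _ (by omega)]
    exact this
  · have : i = j := by omega
    subst this; exact le_refl _

lemma pvBisectGo_spec (o : Int) : ∀ (fuel lo hi : Nat), lo ≤ hi → hi ≤ 38 → hi - lo ≤ fuel →
    (∀ i, i < lo → pvLt o i) → (∀ i, hi ≤ i → i < 38 → ¬ pvLt o i) →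
    (∀ i, i < pvBisectGo o fuel lo hi → pvLt o i) ∧
    (∀ i, pvBisectGo o fuel lo hi ≤ i → i < 38 → ¬ pvLt o i) ∧
    pvBisectGo o fuel lo hi ≤ 38 := by
  intro fuel
  induction fuel with
  | zero =>
    intro lo hi h1 h2 h3 hlow hhigh
    have : lo = hi := by omega
    subst this
    simp only [pvBisectGo]
    exact ⟨hlow, fun i hi' h38 => hhigh i hi' h38, h2⟩
  | succ fuel ih =>
    intro lo hi h1 h2 h3 hlow hhigh
    simp only [pvBisectGo]
    by_cases hlh : lo < hi
    · simp only [if_pos hlh]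
      set mid := (lo + hi) / 2 with hmid
      have hmlt : mid < hi := by omega
      have hmge : lo ≤ mid := by omega
      by_cases hp : pvBounds.getD mid 0 < o
      · simp only [if_pos hp]
        apply ih (mid + 1) hi (by omega) h2 (by omega)
        · intro i hi'
          have : pvBounds.getD i 0 ≤ pvBounds.getD mid 0 := pvBounds_mono (by omega) (by omega)
          exact lt_of_le_of_lt this hp
        · exact hhigh
      · simp only [if_neg hp]
        apply ih lo mid (by omega) (by omega) (by omega) hlow
        intro i hi' h38 hcon
        exact hp (lt_of_le_of_lt (pvBounds_mono hi' h38) hcon)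
    · simp only [if_neg hlh]
      have : lo = hi := by omega
      subst this
      exact ⟨hlow, fun i hi' h38 => hhigh i hi' h38, h2⟩

-- A's linear scan over a zipped table, characterised by any prefix point r of the < o predicate
lemma pvScanA_char (o : Int) : ∀ (bs ws : List Int) (r : Nat), bs.length = ws.length →
    (∀ i, i < r → bs.getD i 0 < o) → (∀ i, r ≤ i → i < bs.length → ¬ bs.getD i 0 < o) →
    pvScanA o (bs.zip ws) = if r < bs.length then ws.getD r 1 else 1 := by
  intro bs
  induction bs with
  | nil =>
    intro ws r _ _ _
    simp [pvScanA]
  | cons b bs' ihb =>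
    intro ws r hlen hlow hhigh
    cases ws with
    | nil => simp at hlen
    | cons w ws' =>
      simp only [List.zip_cons_cons, pvScanA]
      by_cases hob : o ≤ b
      · have hr : r = 0 := by
          by_contra hne
          have hb : (b :: bs').getD 0 0 < o := hlow 0 (by omega)
          simp only [List.getD_cons_zero] at hb
          omega
        subst hr
        simp [if_pos hob]
      · have hb : b < o := by omega
        have hr : ∃ r', r = r' + 1 := by
          rcases r with _ | r'
          · exact absurd hb (hhigh 0 (by omega) (by simp))
          · exact ⟨r', rfl⟩
        obtain ⟨r', rfl⟩ := hr
        rw [if_neg hob]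
        have hrec := ihb ws' r' (by simpa using hlen)
          (fun i hi => by simpa using hlow (i + 1) (by omega))
          (fun i h1 h2 => by
            have := hhigh (i + 1) (by omega) (by simpa using h2)
            simpa using this)
        rw [hrec]
        simp

-- ===== VERDICT (by name: the statement is the Claim_ definition above) =====
theorem getCharWidth_py_spec : Claim_equal_getCharWidth_py := by
  intro o _
  unfold Spec_getCharWidth_py
  by_cases hg : o = 0xe ∨ o = 0xf
  · simp [getCharWidth_py, getCharWidth_py_alt, hg]
  · simp only [getCharWidth_py, getCharWidth_py_alt, if_neg hg]
    have hlen : pvBounds.length = 38 := rfl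
    have hlenW : pvWidthsB.length = 38 := rfl
    obtain ⟨hA, hB, hle⟩ := pvBisectGo_spec o pvBounds.length 0 pvBounds.length
      (by omega) (by rw [hlen]) (by omega)
      (fun i h => absurd h (Nat.not_lt_zero i))
      (fun i h1 h2 => by rw [hlen] at h1; omega)
    rw [hlen] at hA hB ⊢
    have hzip : pvWidthsA = pvBounds.zip pvWidthsB := rfl
    rw [hzip, pvScanA_char o pvBounds pvWidthsB (pvBisectGo o 38 0 38) rfl
      (fun i h => hA i h) (fun i h1 h2 => hB i h1 (by rw [hlen] at h2; exact h2))]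
    rw [hlen, hlenW]
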